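-- pv_equiv track=rewrite | github.com/miliar/Code_Jam_Webscraper | solutions_python/solutions_year13_round0_nr1/1707.py | checkFour
-- ===== SOURCE A (Python) =====
-- def checkFour(fields):
--   currentType = ''
--   for field in fields:
--     if field == '.':
--       return 3
--
--     if field == 'T':
--       continue
--
--     if currentType == '':
--       currentType = field
--
--     if field != currentType:
--       return 2
--
--   if currentType == 'O':
--     return 1
--
--   if currentType == 'X':
--     return 0
-- ===== SOURCE B (Python) =====
-- def checkFour(fields):
--     try:
--         d = fields.index('.')
--     except ValueError:
--         d = len(fields)
--     syms = set(f for f in fields[:d] if f != 'T')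
--     if len(syms) > 1:
--         return 2
--     if d < len(fields):
--         return 3
--     if syms == {'O'}:
--         return 1
--     if syms == {'X'}:
--         return 0
-- ===== Notes on version B (the rewrite author's own statement) =====
-- stated objective: simpler
-- what changed: Replaces the stateful early-exit scan with a currentType accumulator by: locate the first '.', take the distinct non-'T' symbols before it as a set, and decide mixed/incomplete/winner from that set's size and contents.
-- intended difference: On lists whose cells before the first '.' consist (ignoring 'T's) of leading empty strings followed only by copies of one other symbol, A's '' sentinel silently skips those empty strings and returns as if they were absent (3, 1, 0 or None), while B counts '' as a distinct symbol and returns 2 (mixed), the intended verdict for a genuinely foreign token. — e.g. on checkFour(["", "X"]): A returns some 0, B returns some 2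
import Mathlib
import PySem

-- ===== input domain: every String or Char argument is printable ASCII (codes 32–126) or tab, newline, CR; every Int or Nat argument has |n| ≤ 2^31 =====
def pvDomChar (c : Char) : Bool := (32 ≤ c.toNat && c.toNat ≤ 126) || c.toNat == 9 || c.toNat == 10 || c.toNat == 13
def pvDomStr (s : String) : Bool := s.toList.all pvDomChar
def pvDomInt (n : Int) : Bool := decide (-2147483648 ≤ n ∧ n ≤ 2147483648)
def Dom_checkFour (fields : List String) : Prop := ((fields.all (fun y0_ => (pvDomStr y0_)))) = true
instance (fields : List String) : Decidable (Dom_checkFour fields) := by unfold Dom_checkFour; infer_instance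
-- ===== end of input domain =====

-- B decides the verdict from the set of distinct non-'T' symbols before the first '.',
-- instead of A's stateful scan with a currentType accumulator; on lists containing ''
-- cells A's '' sentinel skips them (see D_checkFour below), otherwise behaviour is equal.

-- ===== PORT A =====
-- the for-loop with state currentType, early returns 3/2, final check of currentType
def checkFourLoop : List String → String → Option Int
  | [], currentType =>
      if currentType = "O" then some 1
      else if currentType = "X" then some 0
      else none
  | field :: rest, currentType =>
      if field = "." then some 3
      else if field = "T" then checkFourLoop rest currentType
      else
        let currentType' := if currentType = "" then field else currentType
        if field ≠ currentType' then some 2 else checkFourLoop rest currentType'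

def checkFour (fields : List String) : Option Int := checkFourLoop fields ""

-- ===== PORT B =====
def checkFour_alt (fields : List String) : Option Int :=
  let d : Nat := (PySem.List.index? fields ".").getD fields.length
  let syms : PySem.Set String :=
    PySem.Set.ofList ((PySem.List.slice fields none (some (d : Int))).filter (fun f => f ≠ "T"))
  if PySem.Set.len syms > 1 then some 2
  else if d < fields.length then some 3
  else if PySem.Set.equal syms (PySem.Set.ofList ["O"]) then some 1
  else if PySem.Set.equal syms (PySem.Set.ofList ["X"]) then some 0
  else none

-- ===== PRECONDITION & SPEC =====
-- On lists whose cells before the first '.' consist (ignoring 'T's) of leading empty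
-- strings followed only by copies of one other symbol, A's '' sentinel silently skips
-- the empty strings and answers as if they were absent (3, 1, 0 or none), while B counts
-- '' as a distinct symbol and returns 2 (mixed) — the intended verdict for a foreign token.
def D_checkFour (fields : List String) : Prop :=
  let q := (fields.takeWhile ("." ≠ ·)).filter ("T" ≠ ·)
  ¬ q.IsChain (· = ·) ∧ (q.dropWhile ("" = ·)).IsChain (· = ·)
instance (fields : List String) : Decidable (D_checkFour fields) := by unfold D_checkFour; infer_instance

def Spec_checkFour (fields : List String) (out : Option Int) : Prop :=
  ¬ D_checkFour fields → out = checkFour_alt fields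
instance (fields : List String) (out : Option Int) : Decidable (Spec_checkFour fields out) := by unfold Spec_checkFour; infer_instance

def pvDiffWitness_checkFour : List String := ["", "X"]
def pvDiffWitnessOut_checkFour : (Option Int) × (Option Int) := (some 0, some 2)

-- ===== CLAIM (what is proved, stated in full; the proofs are below) =====
def Claim_unchanged_checkFour : Prop := ∀ (fields : List String), Dom_checkFour fields → Spec_checkFour fields (checkFour fields)
def Claim_changed_checkFour : Prop := Dom_checkFour (pvDiffWitness_checkFour) ∧ D_checkFour (pvDiffWitness_checkFour) ∧ checkFour (pvDiffWitness_checkFour) = pvDiffWitnessOut_checkFour.1 ∧ checkFour_alt (pvDiffWitness_checkFour) = pvDiffWitnessOut_checkFour.2 ∧ pvDiffWitnessOut_checkFour.1 ≠ pvDiffWitnessOut_checkFour.2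
def Claim_exact_checkFour : Prop := ∀ (fields : List String), Dom_checkFour fields → D_checkFour fields → checkFour fields ≠ checkFour_alt fields



-- ===== LEMMAS AND PROOFS =====

-- final check of A's loop on the accumulated currentType
def endCheck (c : String) : Option Int :=
  if c = "O" then some 1 else if c = "X" then some 0 else none

-- A's verdict as a function of the non-'T' tokens before the first '.' (q) and dot presence
def aCore (q : List String) (dot : Bool) : Option Int :=
  match q.dropWhile (fun f => f = "") with
  | [] => if dot then some 3 else none
  | c :: rest =>
      if rest.any (fun x => x ≠ c) then some 2
      else if dot then some 3
      else endCheck c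

-- B's verdict as a function of the same data
def bCore (q : List String) (dot : Bool) : Option Int :=
  if PySem.Set.len (PySem.Set.ofList q) > 1 then some 2
  else if dot then some 3
  else if PySem.Set.equal (PySem.Set.ofList q) (PySem.Set.ofList ["O"]) then some 1
  else if PySem.Set.equal (PySem.Set.ofList q) (PySem.Set.ofList ["X"]) then some 0
  else none

-- A's loop, once currentType is set to cur (cur not '', '.', 'T')
theorem loop_set (fields : List String) : ∀ cur : String, cur ≠ "" → cur ≠ "." → cur ≠ "T" →
    checkFourLoop fields cur =
      if ((fields.takeWhile (fun f => f ≠ ".")).filter (fun f => f ≠ "T")).any (fun x => x ≠ cur)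
      then some 2
      else if "." ∈ fields then some 3
      else endCheck cur := by
  induction fields with
  | nil => intro cur h1 h2 h3; simp [checkFourLoop, endCheck]
  | cons f rest ih =>
    intro cur h1 h2 h3
    by_cases hf : f = "."
    · subst hf; simp [checkFourLoop]
    · have hf' : ¬("." : String) = f := fun h => hf h.symm
      by_cases hT : f = "T"
      · subst hT
        simp [checkFourLoop, ih cur h1 h2 h3, hf, hf', List.takeWhile_cons, List.mem_cons]
      · by_cases hc : f = cur
        · subst hc
          simp [checkFourLoop, ih f h1 h2 h3, hf, hf', hT, h1, List.takeWhile_cons,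
            List.mem_cons]
        · simp [checkFourLoop, hf, hf', hT, h1, hc, List.takeWhile_cons, List.mem_cons]

-- A's loop from the initial '' state equals aCore
theorem loop_start (fields : List String) :
    checkFourLoop fields "" =
      aCore ((fields.takeWhile (fun f => f ≠ ".")).filter (fun f => f ≠ "T"))
        (decide ("." ∈ fields)) := by
  induction fields with
  | nil => simp [checkFourLoop, aCore]
  | cons f rest ih =>
    by_cases hf : f = "."
    · subst hf; simp [checkFourLoop, aCore]
    · have hf' : ¬("." : String) = f := fun h => hf h.symm
      by_cases hT : f = "T"
      · subst hT
        simp [checkFourLoop, ih, hf, hf', List.takeWhile_cons, List.mem_cons]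
      · by_cases he : f = ""
        · subst he
          simp [checkFourLoop, ih, hf, hf', hT, aCore, List.takeWhile_cons, List.mem_cons]
        · simp [checkFourLoop, loop_set rest f he hf hT, hf, hf', hT, he, aCore,
            List.takeWhile_cons, List.dropWhile_cons, List.mem_cons]

theorem checkFour_eq_aCore (fields : List String) :
    checkFour fields =
      aCore ((fields.takeWhile (fun f => f ≠ ".")).filter (fun f => f ≠ "T"))
        (decide ("." ∈ fields)) := loop_start fields

-- B-side bridge lemmas: the first-dot index cut is the takeWhile prefix
theorem take_idx (fields : List String) :
    fields.take ((PySem.List.index? fields ".").getD fields.length) =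
      fields.takeWhile (fun f => f ≠ ".") := by
  induction fields with
  | nil => simp
  | cons f rest ih =>
    by_cases hf : f = "."
    · subst hf; rw [PySem.List.index?_cons_self]; simp
    · rw [PySem.List.index?_cons_of_ne _ hf]
      cases h : PySem.List.index? rest "." with
      | none => rw [h] at ih; simpa [hf] using ih
      | some k => rw [h] at ih; simpa [hf] using ih

theorem idx_lt (fields : List String) :
    ((PySem.List.index? fields ".").getD fields.length < fields.length) ↔ "." ∈ fields := by
  cases h : PySem.List.index? fields "." with
  | none =>
    have := (PySem.List.index?_eq_none_iff fields ".").mp h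
    simp [this]
  | some k =>
    obtain ⟨hk, hv, _⟩ := PySem.List.getElem_of_index?_eq_some h
    simp only [Option.getD_some]
    exact iff_of_true hk (hv ▸ List.getElem_mem hk)

theorem checkFour_alt_eq_bCore (fields : List String) :
    checkFour_alt fields =
      bCore ((fields.takeWhile (fun f => f ≠ ".")).filter (fun f => f ≠ "T"))
        (decide ("." ∈ fields)) := by
  have hidx : ((List.idxOf? "." fields).getD fields.length < fields.length) ↔ "." ∈ fields := by
    rw [← PySem.List.index?_eq_idxOf?]; exact idx_lt fields
  simp only [checkFour_alt, bCore, PySem.List.slice_to_natCast, take_idx]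
  by_cases hd : "." ∈ fields
  · simp [hd, hidx]
  · simp [hd, hidx]

-- set facts
theorem ofList_all_eq {c : String} : ∀ q : List String, (∀ x ∈ q, x = c) → q ≠ [] →
    PySem.Set.ofList q = [c] := by
  intro q hall hne
  rw [PySem.Set.ofList_eq_foldl]
  cases q with
  | nil => exact absurd rfl hne
  | cons a t =>
    have ha := hall a (by simp); subst ha
    simp only [List.foldl_cons]
    have hstep : PySem.Set.add ([] : PySem.Set String) a = [a] := by
      simp [PySem.Set.add, PySem.Set.contains]
    rw [hstep]
    have haux : ∀ (t : List String), (∀ x ∈ t, x = a) → List.foldl PySem.Set.add [a] t = [a] := by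
      intro t; induction t with
      | nil => intro _; rfl
      | cons b s ihs =>
        intro h
        have hb := h b (by simp); subst hb
        simp only [List.foldl_cons]
        have hs : PySem.Set.add ([b] : PySem.Set String) b = [b] := by
          simp [PySem.Set.add, PySem.Set.contains]
        rw [hs]
        exact ihs (fun x hx => h x (by simp [hx]))
    exact haux t (fun x hx => hall x (by simp [hx]))

theorem one_lt_len {q : List String} {x y : String}
    (hx : x ∈ PySem.Set.ofList q) (hy : y ∈ PySem.Set.ofList q) (hxy : x ≠ y) :
    1 < (PySem.Set.ofList q).length := by
  rcases h : PySem.Set.ofList q with _ | ⟨a, _ | ⟨b, t⟩⟩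
  · rw [h] at hx; simp at hx
  · rw [h] at hx hy; simp at hx hy; exact absurd (hx.trans hy.symm) hxy
  · simp

theorem equal_singleton (c d : String) :
    PySem.Set.equal ([c] : PySem.Set String) (PySem.Set.ofList [d]) = true ↔ c = d := by
  have h0 : PySem.Set.ofList [d] = [d] := rfl
  rw [h0, PySem.Set.equal_iff]
  constructor
  · intro h; simpa using (h c).mp (by simp)
  · intro h; subst h; intro x; exact Iff.rfl

-- head of dropWhile does not satisfy the predicate
theorem dropWhile_head_ne {q : List String} {c : String} {rest : List String}
    (h : q.dropWhile (fun f => f = "") = c :: rest) : c ≠ "" := by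
  have := List.dropWhile_get_zero_not (p := fun f => decide (f = "")) q (by rw [h]; simp)
  simp [h] at this; exact this

theorem mem_of_mem_dropWhile {q : List String} {x : String}
    (h : x ∈ q.dropWhile (fun f => f = "")) : x ∈ q :=
  (List.dropWhile_sublist _).mem h

-- D_'s flipped-comparison spelling versus the standard one used in the proofs below
theorem D_std (fields : List String) : D_checkFour fields ↔
    (¬ ((fields.takeWhile (fun f => f ≠ ".")).filter (fun f => f ≠ "T")).IsChain (· = ·) ∧
     (((fields.takeWhile (fun f => f ≠ ".")).filter (fun f => f ≠ "T")).dropWhile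
        (fun f => f = "")).IsChain (· = ·)) := by
  unfold D_checkFour
  have h1 : (fields.takeWhile (fun f => "." ≠ f)).filter (fun f => "T" ≠ f) =
      (fields.takeWhile (fun f => f ≠ ".")).filter (fun f => f ≠ "T") := by
    congr 1
    · funext f; simp [eq_comm]
    · congr 1; funext f; simp [eq_comm]
  have h2 : (fun f : String => decide ("" = f)) = (fun f : String => decide (f = "")) := by
    funext f; simp [eq_comm]
  rw [h1, h2]

-- all-equal lists are exactly the (· = ·)-chains
theorem pairwise_of_all_eq {a : String} : ∀ {t : List String}, (∀ x ∈ t, x = a) →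
    t.Pairwise (fun x y => x = y) := by
  intro t; induction t with
  | nil => intro _; exact List.Pairwise.nil
  | cons b s ihs =>
    intro h
    have hb := h b (by simp)
    refine List.Pairwise.cons (fun y hy => ?_) (ihs fun x hx => h x (by simp [hx]))
    rw [hb, h y (by simp [hy])]

theorem uniform_iff (l : List String) :
    l.IsChain (· = ·) ↔ ∀ x ∈ l, x = l.headD "" := by
  rw [List.isChain_iff_pairwise]
  cases l with
  | nil => simp
  | cons a t =>
    simp only [List.pairwise_cons, List.headD_cons, List.mem_cons]
    constructor
    · rintro ⟨ha, _⟩ x hx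
      rcases hx with rfl | hx
      · rfl
      · exact (ha x hx).symm
    · intro h
      exact ⟨fun y hy => (h y (Or.inr hy)).symm,
        pairwise_of_all_eq (fun x hx => h x (Or.inr hx))⟩

-- the compact D_ condition in the elementwise form the core lemmas use
theorem D_bridge (q : List String) :
    (¬ q.IsChain (· = ·) ∧ (q.dropWhile (fun f => f = "")).IsChain (· = ·)) ↔
      (q.head? = some "" ∧ q.dropWhile (fun f => f = "") ≠ [] ∧
       (∀ x ∈ q.dropWhile (fun f => f = ""), x = (q.dropWhile (fun f => f = "")).headD "")) := by
  rw [uniform_iff q, uniform_iff (q.dropWhile (fun f => f = ""))]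
  constructor
  · rintro ⟨hnq, hr⟩
    cases q with
    | nil => exact absurd (by simp) hnq
    | cons a t =>
      by_cases ha : a = ""
      · subst ha
        refine ⟨by simp, ?_, hr⟩
        intro hnil
        apply hnq
        intro x hx
        have := List.dropWhile_eq_nil_iff.mp hnil x hx
        simpa using this
      · exfalso
        apply hnq
        have : (a :: t).dropWhile (fun f => f = "") = a :: t := by simp [ha]
        rw [this] at hr
        exact hr
  · rintro ⟨hh, hrne, hall⟩
    refine ⟨?_, hall⟩
    intro huni
    cases hr : q.dropWhile (fun f => f = "") with
    | nil => exact hrne hr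
    | cons c rest =>
      have hc : c ≠ "" := dropWhile_head_ne hr
      have hcq : c ∈ q := mem_of_mem_dropWhile (hr ▸ List.mem_cons_self ..)
      have hhd : q.headD "" = "" := by
        cases q with
        | nil => simp at hh
        | cons a t => simpa using (by simpa using hh : a = "")
      exact hc ((huni c hcq).trans hhd)

-- the core equivalence outside the change region
theorem core_eq (q : List String) (dot : Bool)
    (h : ¬ (q.head? = some "" ∧ q.dropWhile (fun f => f = "") ≠ [] ∧
            (∀ x ∈ q.dropWhile (fun f => f = ""), x = (q.dropWhile (fun f => f = "")).headD ""))) :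
    aCore q dot = bCore q dot := by
  unfold aCore bCore
  cases hr : q.dropWhile (fun f => f = "") with
  | nil =>
    have hall : ∀ x ∈ q, x = "" := by
      intro x hx
      have := List.dropWhile_eq_nil_iff.mp hr x hx
      simpa using this
    cases hq : q with
    | nil => simp [PySem.Set.ofList, PySem.Set.len, PySem.Set.equal, PySem.Set.issubset]
    | cons a t =>
      rw [← hq]
      have hof : PySem.Set.ofList q = [""] := ofList_all_eq q hall (by simp [hq])
      simp [hof, PySem.Set.len, equal_singleton]
  | cons c rest =>
    have hc : c ≠ "" := dropWhile_head_ne hr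
    by_cases hany : rest.any (fun x => x ≠ c)
    · obtain ⟨x, hxmem, hxc⟩ := List.any_eq_true.mp hany
      simp only [ne_eq, decide_eq_true_eq] at hxc
      have hxq : x ∈ q := mem_of_mem_dropWhile (hr ▸ List.mem_cons_of_mem c hxmem)
      have hcq : c ∈ q := mem_of_mem_dropWhile (hr ▸ List.mem_cons_self ..)
      have hlen : 1 < (PySem.Set.ofList q).length :=
        one_lt_len ((PySem.Set.mem_ofList q x).mpr hxq) ((PySem.Set.mem_ofList q c).mpr hcq) hxc
      simp [hlen, PySem.Set.len]
      intro hall'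
      exact absurd (hall' x hxmem) hxc
    · have hallr : ∀ x ∈ q.dropWhile (fun f => f = ""), x = c := by
        intro x hx
        rw [hr] at hx
        rcases List.mem_cons.mp hx with h1 | h1
        · exact h1
        · by_contra hne
          exact hany (List.any_eq_true.mpr ⟨x, h1, by simpa using hne⟩)
      have hqr : q.dropWhile (fun f => f = "") = q := by
        cases hq : q with
        | nil => simp [hq] at hr
        | cons a t =>
          by_cases ha : a = ""
          · exfalso
            apply h
            refine ⟨by simp [hq, ha], by simp [hr], ?_⟩
            rw [hr]; simpa [hr] using hallr
          · simp [hq, ha]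
      rw [hqr] at hr hallr
      have hofq : PySem.Set.ofList q = [c] := ofList_all_eq q hallr (by simp [hr])
      have hanyf : rest.any (fun x => x ≠ c) = false := by simpa using hany
      simp [hanyf, hofq, PySem.Set.len, equal_singleton, endCheck]
      intro x hx hne
      exact absurd (hallr x (hr ▸ List.mem_cons_of_mem c hx)) hne

-- inside D_ the two cores always differ: B says 2 (mixed), A never does
theorem core_ne (q : List String) (dot : Bool)
    (h : q.head? = some "" ∧ q.dropWhile (fun f => f = "") ≠ [] ∧
         (∀ x ∈ q.dropWhile (fun f => f = ""), x = (q.dropWhile (fun f => f = "")).headD "")) :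
    aCore q dot ≠ bCore q dot := by
  obtain ⟨hhead, hrne, hall⟩ := h
  cases hr : q.dropWhile (fun f => f = "") with
  | nil => exact absurd hr hrne
  | cons c rest =>
    have hc : c ≠ "" := dropWhile_head_ne hr
    rw [hr] at hall
    simp only [List.headD_cons] at hall
    have hcq : c ∈ q := mem_of_mem_dropWhile (hr ▸ List.mem_cons_self ..)
    have heq : "" ∈ q := by
      cases hq : q with
      | nil => simp [hq] at hhead
      | cons a t => rw [hq] at hhead; simp at hhead; simp [hhead.symm]
    have hlen : 1 < (PySem.Set.ofList q).length :=
      one_lt_len ((PySem.Set.mem_ofList q "").mpr heq) ((PySem.Set.mem_ofList q c).mpr hcq)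
        (Ne.symm hc)
    have hB : bCore q dot = some 2 := by unfold bCore; simp [PySem.Set.len, hlen]
    have hany : rest.any (fun x => x ≠ c) = false := by
      rw [List.any_eq_false]
      intro x hx
      simpa using hall x (List.mem_cons_of_mem c hx)
    have hA : aCore q dot ≠ some 2 := by
      unfold aCore
      rw [hr]
      simp only [hany, Bool.false_eq_true, if_false]
      cases dot <;> simp [endCheck] <;> split_ifs <;> simp
    rw [hB]; exact hA

-- ===== VERDICT (by name: the statement is the Claim_ definition above) =====
theorem checkFour_spec : Claim_unchanged_checkFour := by
  intro fields _ hD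
  rw [checkFour_eq_aCore, checkFour_alt_eq_bCore]
  exact core_eq _ _ (fun hold => hD ((D_std fields).mpr ((D_bridge _).mpr hold)))
theorem checkFour_changed : Claim_changed_checkFour := by unfold Claim_changed_checkFour; decide
theorem checkFour_tight : Claim_exact_checkFour := by
  intro fields _ hD
  rw [checkFour_eq_aCore, checkFour_alt_eq_bCore]
  exact core_ne _ _ ((D_bridge _).mp ((D_std fields).mp hD))
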